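-- pv_equiv track=rewrite | github.com/tianyu1997/box_aabb | cpp/v6/scripts/gcs_optimize.py | expand_corridor
-- ===== SOURCE A (Python) =====
-- def expand_corridor(adj, path_boxes, hops):
--     corridor = set(path_boxes)
--     frontier = set(path_boxes)
--     for _ in range(hops):
--         nxt = set()
--         for bid in frontier:
--             for nbr in adj.get(bid, []):
--                 if nbr not in corridor:
--                     corridor.add(nbr)
--                     nxt.add(nbr)
--         frontier = nxt
--     return corridor
-- ===== SOURCE B (Python) =====
-- def _push(corridor, queue, node, depth):
--     if node not in corridor:
--         corridor.add(node)
--         queue.append((node, depth))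
--
--
-- def expand_corridor(adj, path_boxes, hops):
--     corridor = set()
--     queue = []
--     for b in path_boxes:
--         _push(corridor, queue, b, 0)
--     i = 0
--     while i < len(queue):
--         bid, d = queue[i]
--         i += 1
--         if d < hops:
--             for nbr in adj.get(bid, []):
--                 _push(corridor, queue, nbr, d + 1)
--     return corridor
-- ===== Notes on version B (the rewrite author's own statement) =====
-- stated objective: alternative
-- what changed: Replaced the level-synchronous frontier-set loop (which always runs hops rounds, rebuilding a frontier set per round) by a single-queue BFS carrying an explicit per-node depth that expands a node only while its depth is below hops and stops as soon as the queue empties.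
import Mathlib
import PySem

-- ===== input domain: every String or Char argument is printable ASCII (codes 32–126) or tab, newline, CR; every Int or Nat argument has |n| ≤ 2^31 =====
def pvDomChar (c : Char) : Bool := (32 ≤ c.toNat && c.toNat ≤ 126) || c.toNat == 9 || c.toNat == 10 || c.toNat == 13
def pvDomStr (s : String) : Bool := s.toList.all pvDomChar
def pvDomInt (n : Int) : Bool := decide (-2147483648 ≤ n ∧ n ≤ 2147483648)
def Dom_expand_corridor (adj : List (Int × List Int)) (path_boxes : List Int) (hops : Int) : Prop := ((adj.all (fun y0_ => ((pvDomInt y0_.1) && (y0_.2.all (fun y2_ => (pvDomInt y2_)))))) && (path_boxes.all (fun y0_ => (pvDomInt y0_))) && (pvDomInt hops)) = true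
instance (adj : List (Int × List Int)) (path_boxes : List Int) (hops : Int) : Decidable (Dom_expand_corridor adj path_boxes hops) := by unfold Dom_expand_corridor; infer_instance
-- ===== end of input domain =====

-- B replaces A's level-synchronous frontier loop (always `hops` rounds) by a single-queue BFS
-- with an explicit per-node depth that stops when the queue empties; same returned set.

-- ===== PORT A =====
-- inner body: `if nbr not in corridor: corridor.add(nbr); nxt.add(nbr)` on the state (corridor, nxt)
def pvAddStep (st : PySem.Set Int × PySem.Set Int) (nbr : Int) : PySem.Set Int × PySem.Set Int :=
  if PySem.Set.contains st.1 nbr then st else (PySem.Set.add st.1 nbr, PySem.Set.add st.2 nbr)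

-- `for nbr in adj.get(bid, [])`
def pvVisitA (adj : List (Int × List Int)) (st : PySem.Set Int × PySem.Set Int) (bid : Int) :
    PySem.Set Int × PySem.Set Int :=
  (PySem.Dict.getD (PySem.Dict.mk adj) bid []).foldl pvAddStep st

-- one iteration of `for _ in range(hops)`: state (corridor, frontier), nxt starts empty
def pvLevelA (adj : List (Int × List Int)) (st : PySem.Set Int × PySem.Set Int) :
    PySem.Set Int × PySem.Set Int :=
  st.2.foldl (pvVisitA adj) (st.1, PySem.Set.empty)

def expand_corridor (adj : List (Int × List Int)) (path_boxes : List Int) (hops : Int) : List Int :=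
  ((PySem.List.pyRange 0 hops 1).foldl (fun st _ => pvLevelA adj st)
    (PySem.Set.ofList path_boxes, PySem.Set.ofList path_boxes)).1

-- ===== PORT B =====
-- Source B's `_push(corridor, queue, node, depth)` on the state (corridor, queue)
def pvPush (e : Int) (p : PySem.Set Int × List (Int × Int)) (node : Int) :
    PySem.Set Int × List (Int × Int) :=
  if PySem.Set.contains p.1 node then p else (PySem.Set.add p.1 node, p.2 ++ [(node, e)])

-- fuel bookkeeping (a totality guard only, not part of B's algorithm): every BFS step
-- strictly decreases queue length + number of adjacency-value nodes still outside the corridor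
def pvAllNbrs (adj : List (Int × List Int)) : List Int := adj.flatMap (fun kv => kv.2)

def pvMissing (adj : List (Int × List Int)) (c : List Int) : Nat :=
  (PySem.Set.ofList (pvAllNbrs adj)).countP (fun x => decide (¬ x ∈ c))

-- Source B's `while i < len(queue)` loop: pop (bid, d); expand only while d < hops
def pvGo (adj : List (Int × List Int)) (hops : Int) :
    Nat → PySem.Set Int → List (Int × Int) → List Int
  | _, corridor, [] => corridor
  | 0, corridor, _ :: _ => corridor          -- fuel exhausted: never reached from pvBfsB
  | fuel + 1, corridor, (bid, d) :: rest =>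
    if d < hops then
      let st := (PySem.Dict.getD (PySem.Dict.mk adj) bid []).foldl (pvPush (d + 1)) (corridor, rest)
      pvGo adj hops fuel st.1 st.2
    else
      pvGo adj hops fuel corridor rest

def pvBfsB (adj : List (Int × List Int)) (hops : Int) (corridor : PySem.Set Int)
    (pend : List (Int × Int)) : List Int :=
  pvGo adj hops (pend.length + pvMissing adj corridor) corridor pend

def expand_corridor_alt (adj : List (Int × List Int)) (path_boxes : List Int) (hops : Int) :
    List Int :=
  let s := path_boxes.foldl (pvPush 0) (PySem.Set.empty, [])
  pvBfsB adj hops s.1 s.2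

-- ===== PRECONDITION & SPEC =====
def Spec_expand_corridor (adj : List (Int × List Int)) (path_boxes : List Int) (hops : Int) (out : List Int) : Prop := out = expand_corridor_alt adj path_boxes hops
instance (adj : List (Int × List Int)) (path_boxes : List Int) (hops : Int) (out : List Int) : Decidable (Spec_expand_corridor adj path_boxes hops out) := by unfold Spec_expand_corridor; infer_instance

-- ===== CLAIM (what is proved, stated in full; the proofs are below) =====
def Claim_equal_expand_corridor : Prop := ∀ (adj : List (Int × List Int)) (path_boxes : List Int) (hops : Int), Dom_expand_corridor adj path_boxes hops → Spec_expand_corridor adj path_boxes hops (expand_corridor adj path_boxes hops)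

-- ===== LEMMAS AND PROOFS =====

-- one fresh insertion into the corridor removes exactly one element from the missing count
theorem pvCountDrop (n : Int) : ∀ (base c : List Int), base.Nodup → n ∈ base → n ∉ c →
    base.countP (fun x => decide (¬ x ∈ c ++ [n])) + 1 ≤ base.countP (fun x => decide (¬ x ∈ c)) := by
  intro base
  induction base with
  | nil => intro c _ hn _; simp at hn
  | cons b bs ih =>
    intro c hnd hn hnc
    rw [List.countP_cons, List.countP_cons]
    have hmono : bs.countP (fun x => decide (¬ x ∈ c ++ [n])) ≤ bs.countP (fun x => decide (¬ x ∈ c)) := by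
      apply List.countP_mono_left
      intro x _ hx
      simp only [decide_eq_true_eq, List.mem_append] at *
      exact fun hc => hx (Or.inl hc)
    by_cases hb : b = n
    · subst hb
      have h1 : (decide (¬ b ∈ c ++ [b])) = false := by simp
      have h2 : (decide (¬ b ∈ c)) = true := by simpa using hnc
      rw [h1, h2]
      simp only [Bool.false_eq_true, if_false, if_true]
      omega
    · have hn' : n ∈ bs := by
        rcases List.mem_cons.mp hn with h | h
        · exact absurd h.symm hb
        · exact h
      have := ih c (List.Nodup.of_cons hnd) hn' hnc
      have hhead : (if decide (¬ b ∈ c ++ [n]) = true then 1 else 0)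
          ≤ (if decide (¬ b ∈ c) = true then 1 else 0) := by
        by_cases hbc : b ∈ c
        · simp [hbc]
        · simp [hbc, hb]
      omega

-- a fold of pvPush can only shrink (queue length + missing count): each push trades a
-- queue slot for a fresh corridor member drawn from the adjacency values
theorem pvPush_phi (adj : List (Int × List Int)) (e : Int) (nbrs : List Int)
    (hsub : ∀ x ∈ nbrs, x ∈ PySem.Set.ofList (pvAllNbrs adj)) :
    ∀ (c : List Int) (q : List (Int × Int)),
    (nbrs.foldl (pvPush e) (c, q)).2.length + pvMissing adj (nbrs.foldl (pvPush e) (c, q)).1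
      ≤ q.length + pvMissing adj c := by
  induction nbrs with
  | nil => intro c q; simp
  | cons nbr rest ih =>
    intro c q
    have hsub' : ∀ x ∈ rest, x ∈ PySem.Set.ofList (pvAllNbrs adj) :=
      fun x hx => hsub x (List.mem_cons_of_mem _ hx)
    by_cases h : nbr ∈ c
    · rw [List.foldl_cons]
      have hstep : pvPush e (c, q) nbr = (c, q) := by
        simp [pvPush, PySem.Set.contains, h]
      rw [hstep]
      exact ih hsub' c q
    · rw [List.foldl_cons]
      have hstep : pvPush e (c, q) nbr = (c ++ [nbr], q ++ [(nbr, e)]) := by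
        simp [pvPush, PySem.Set.add, PySem.Set.contains, h]
      rw [hstep]
      have h1 := ih hsub' (c ++ [nbr]) (q ++ [(nbr, e)])
      have h2 : pvMissing adj (c ++ [nbr]) + 1 ≤ pvMissing adj c :=
        pvCountDrop nbr (PySem.Set.ofList (pvAllNbrs adj)) c
          (PySem.Set.nodup_ofList _) (hsub nbr (List.mem_cons_self ..)) h
      simp only [List.length_append, List.length_cons, List.length_nil] at h1 ⊢
      omega

-- neighbours looked up for any node are among the adjacency values
theorem pvGetD_sub (adj : List (Int × List Int)) (bid : Int) :
    ∀ x ∈ PySem.Dict.getD (PySem.Dict.mk adj) bid [], x ∈ PySem.Set.ofList (pvAllNbrs adj) := by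
  induction adj with
  | nil => simp [PySem.Dict.getD, PySem.Dict.get?]
  | cons kv rest ih =>
    intro x hx
    rw [PySem.Set.mem_ofList]
    simp only [PySem.Dict.getD, PySem.Dict.get?, List.find?] at hx
    by_cases h : kv.1 == bid
    · rw [h] at hx
      simp only [Option.map_some, Option.getD_some] at hx
      simp [pvAllNbrs, List.mem_flatMap]
      exact Or.inl hx
    · simp only [Bool.not_eq_true] at h
      rw [h] at hx
      have := ih x (by simpa [PySem.Dict.getD, PySem.Dict.get?] using hx)
      rw [PySem.Set.mem_ofList] at this
      simp only [pvAllNbrs, List.mem_flatMap] at this ⊢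
      obtain ⟨l, hl, hxl⟩ := this
      exact ⟨l, List.mem_cons_of_mem _ hl, hxl⟩

-- pvGo ignores the exact fuel as long as it covers the potential
theorem pvGo_congr (adj : List (Int × List Int)) (hops : Int) : ∀ (fuel : Nat)
    (c : PySem.Set Int) (q : List (Int × Int)) (fuel' : Nat),
    q.length + pvMissing adj c ≤ fuel → q.length + pvMissing adj c ≤ fuel' →
    pvGo adj hops fuel c q = pvGo adj hops fuel' c q := by
  intro fuel
  induction fuel with
  | zero =>
    intro c q fuel' h _
    have hq : q = [] := List.length_eq_zero_iff.mp (by omega)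
    subst hq
    cases fuel' <;> rfl
  | succ f ihf =>
    intro c q fuel' h h'
    cases q with
    | nil => cases fuel' <;> rfl
    | cons p rest =>
      obtain ⟨bid, d⟩ := p
      cases fuel' with
      | zero => exfalso; simp only [List.length_cons] at h'; omega
      | succ f' =>
        simp only [List.length_cons] at h h'
        by_cases hd : d < hops
        · have hphi := pvPush_phi adj (d + 1) (PySem.Dict.getD (PySem.Dict.mk adj) bid [])
            (pvGetD_sub adj bid) c rest
          simp only [pvGo, if_pos hd]
          exact ihf _ _ f' (by omega) (by omega)
        · simp only [pvGo, if_neg hd]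
          exact ihf c rest f' (by omega) (by omega)

theorem pvBfsB_nil (adj : List (Int × List Int)) (hops : Int) (c : PySem.Set Int) :
    pvBfsB adj hops c [] = c := by
  unfold pvBfsB
  cases h : [].length + pvMissing adj c <;> rfl

theorem pvBfsB_cons_pos (adj : List (Int × List Int)) (hops : Int) (c : PySem.Set Int)
    (bid d : Int) (rest : List (Int × Int)) (hd : d < hops) :
    pvBfsB adj hops c ((bid, d) :: rest)
      = pvBfsB adj hops
          ((PySem.Dict.getD (PySem.Dict.mk adj) bid []).foldl (pvPush (d + 1)) (c, rest)).1
          ((PySem.Dict.getD (PySem.Dict.mk adj) bid []).foldl (pvPush (d + 1)) (c, rest)).2 := by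
  have hphi := pvPush_phi adj (d + 1) (PySem.Dict.getD (PySem.Dict.mk adj) bid [])
    (pvGetD_sub adj bid) c rest
  unfold pvBfsB
  have hfuel : ((bid, d) :: rest).length + pvMissing adj c
      = (rest.length + pvMissing adj c) + 1 := by simp [List.length_cons]; omega
  rw [hfuel]
  simp only [pvGo, if_pos hd]
  exact pvGo_congr adj hops _ _ _ _ (by omega) (by omega)

theorem pvBfsB_cons_neg (adj : List (Int × List Int)) (hops : Int) (c : PySem.Set Int)
    (bid d : Int) (rest : List (Int × Int)) (hd : ¬ d < hops) :
    pvBfsB adj hops c ((bid, d) :: rest) = pvBfsB adj hops c rest := by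
  unfold pvBfsB
  have hfuel : ((bid, d) :: rest).length + pvMissing adj c
      = (rest.length + pvMissing adj c) + 1 := by simp [List.length_cons]; omega
  rw [hfuel]
  simp only [pvGo, if_neg hd]


-- A's inner double loop and B's _push-fold perform the same membership-guarded insertions:
-- starting from corridor c, frontier-so-far ns ⊆ c and any queue q, both append the same fresh `new`.
theorem pvInnerAlign (e : Int) (nbrs : List Int) : ∀ (c ns : List Int) (q : List (Int × Int)),
    (∀ x ∈ ns, x ∈ c) →
    ∃ new : List Int,
      nbrs.foldl pvAddStep (c, ns) = (c ++ new, ns ++ new) ∧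
      nbrs.foldl (pvPush e) (c, q) = (c ++ new, q ++ new.map (fun b => (b, e))) ∧
      (∀ x ∈ ns ++ new, x ∈ c ++ new) := by
  induction nbrs with
  | nil => intro c ns q hinv; exact ⟨[], by simp, by simp, by simpa using hinv⟩
  | cons nbr rest ih =>
    intro c ns q hinv
    by_cases h : nbr ∈ c
    · obtain ⟨new, hA, hB, hI⟩ := ih c ns q hinv
      refine ⟨new, ?_, ?_, hI⟩
      · rw [List.foldl_cons]; simpa [pvAddStep, PySem.Set.contains, h] using hA
      · rw [List.foldl_cons]; simpa [pvPush, PySem.Set.contains, h] using hB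
    · have hns : nbr ∉ ns := fun hm => h (hinv nbr hm)
      have haddc : PySem.Set.add c nbr = c ++ [nbr] := by
        simp [PySem.Set.add, PySem.Set.contains, h]
      have haddns : PySem.Set.add ns nbr = ns ++ [nbr] := by
        simp [PySem.Set.add, PySem.Set.contains, hns]
      have hinv' : ∀ x ∈ ns ++ [nbr], x ∈ c ++ [nbr] := by
        intro x hx
        rcases List.mem_append.mp hx with hx | hx
        · exact List.mem_append.mpr (Or.inl (hinv x hx))
        · exact List.mem_append.mpr (Or.inr hx)
      obtain ⟨new, hA, hB, hI⟩ := ih (c ++ [nbr]) (ns ++ [nbr]) (q ++ [(nbr, e)]) hinv'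
      refine ⟨nbr :: new, ?_, ?_, ?_⟩
      · rw [List.foldl_cons]
        simpa [pvAddStep, PySem.Set.contains, h, haddc, haddns] using hA
      · rw [List.foldl_cons]
        simpa [pvPush, PySem.Set.contains, h, haddc] using hB
      · intro x hx
        have : x ∈ (c ++ [nbr]) ++ new := hI x (by simpa using hx)
        simpa using this

-- the first component of A's inner fold is just repeated Set.add
theorem pvFstAddStep (pb : List Int) : ∀ (c ns : List Int),
    (pb.foldl pvAddStep (c, ns)).1 = pb.foldl PySem.Set.add c := by
  induction pb with
  | nil => intro c ns; rfl
  | cons x rest ih =>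
    intro c ns
    by_cases h : x ∈ c
    · have hadd : PySem.Set.add c x = c := by simp [PySem.Set.add, PySem.Set.contains, h]
      rw [List.foldl_cons, List.foldl_cons, hadd]
      simpa [pvAddStep, PySem.Set.contains, h] using ih c ns
    · rw [List.foldl_cons, List.foldl_cons]
      simpa [pvAddStep, PySem.Set.contains, h] using
        ih (PySem.Set.add c x) (PySem.Set.add ns x)

-- entries whose depth has reached hops are popped without effect
theorem pvDrain (adj : List (Int × List Int)) (hops : Int) :
    ∀ (q : List (Int × Int)) (c : PySem.Set Int),
    (∀ p ∈ q, ¬ p.2 < hops) → pvBfsB adj hops c q = c := by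
  intro q
  induction q with
  | nil => intro c _; exact pvBfsB_nil adj hops c
  | cons p rest ih =>
    intro c hq
    obtain ⟨bid, d⟩ := p
    have hd : ¬ d < hops := hq (bid, d) (List.mem_cons_self ..)
    rw [pvBfsB_cons_neg adj hops c bid d rest hd]
    exact ih c fun p hp => hq p (List.mem_cons_of_mem _ hp)

-- a fold that ignores the list elements is function iteration
theorem pvFoldConst {α β : Type} (f : β → β) (l : List α) : ∀ (init : β),
    l.foldl (fun s _ => f s) init = f^[l.length] init := by
  induction l with
  | nil => intro init; rfl
  | cons x rest ih =>
    intro init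
    rw [List.foldl_cons, ih, List.length_cons, Function.iterate_succ_apply]

-- mid-level form: remaining frontier fs at depth hops-(m+1), discovered ns at depth hops-m
theorem pvR (adj : List (Int × List Int)) (hops : Int) (m : Nat)
    (hQ : ∀ (c ns : List Int),
      pvBfsB adj hops c (ns.map (fun b => (b, hops - m))) = ((pvLevelA adj)^[m] (c, ns)).1) :
    ∀ (fs ns c : List Int), (∀ x ∈ ns, x ∈ c) →
    pvBfsB adj hops c (fs.map (fun b => (b, hops - ((m : Int) + 1))) ++ ns.map (fun b => (b, hops - m)))
      = ((pvLevelA adj)^[m] (fs.foldl (pvVisitA adj) (c, ns))).1 := by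
  intro fs
  induction fs with
  | nil => intro ns c _; simpa using hQ c ns
  | cons f fs' ih =>
    intro ns c hinv
    have hd : hops - ((m : Int) + 1) < hops := by omega
    have he : hops - ((m : Int) + 1) + 1 = hops - (m : Int) := by ring
    obtain ⟨new, hA, hB, hI⟩ :=
      pvInnerAlign (hops - ((m : Int) + 1) + 1) (PySem.Dict.getD (PySem.Dict.mk adj) f []) c ns
        (fs'.map (fun b => (b, hops - ((m : Int) + 1))) ++ ns.map (fun b => (b, hops - (m : Int))))
        hinv
    rw [List.map_cons, List.cons_append, pvBfsB_cons_pos adj hops c f _ _ hd, hB]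
    have hq : (fs'.map (fun b => (b, hops - ((m : Int) + 1))) ++ ns.map (fun b => (b, hops - (m : Int))))
          ++ new.map (fun b => (b, hops - ((m : Int) + 1) + 1))
        = fs'.map (fun b => (b, hops - ((m : Int) + 1))) ++ (ns ++ new).map (fun b => (b, hops - (m : Int))) := by
      rw [he, List.map_append, List.append_assoc]
    rw [hq, ih (ns ++ new) (c ++ new) hI]
    rw [List.foldl_cons]
    have hv : pvVisitA adj (c, ns) f = (c ++ new, ns ++ new) := by
      simpa [pvVisitA] using hA
    rw [hv]

-- whole-frontier form: queue = frontier ns at depth hops - m ⇒ result = m more levels of A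
theorem pvQ (adj : List (Int × List Int)) (hops : Int) (m : Nat) : ∀ (c ns : List Int),
    pvBfsB adj hops c (ns.map (fun b => (b, hops - m))) = ((pvLevelA adj)^[m] (c, ns)).1 := by
  induction m with
  | zero =>
    intro c ns
    simp only [Nat.cast_zero, Function.iterate_zero, id]
    apply pvDrain
    intro p hp
    obtain ⟨b, _, rfl⟩ := List.mem_map.mp hp
    simp
  | succ m ihm =>
    intro c ns
    have := pvR adj hops m ihm ns [] c (by simp)
    simp only [List.map_nil, List.append_nil] at this
    have hc : ((m : Int) + 1) = ((m + 1 : Nat) : Int) := by push_cast; ring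
    rw [← hc, this, Function.iterate_succ_apply]
    rfl

-- ===== VERDICT (by name: the statement is the Claim_ definition above) =====
theorem expand_corridor_spec : Claim_equal_expand_corridor := by
  intro adj pb hops _hdom
  unfold Spec_expand_corridor
  obtain ⟨new, hA, hB, _⟩ := pvInnerAlign 0 pb [] [] [] (by simp)
  simp only [List.nil_append] at hA hB
  have hnew : new = PySem.Set.ofList pb := by
    have h1 := pvFstAddStep pb [] []
    rw [hA] at h1
    rw [PySem.Set.ofList_eq_foldl]
    exact h1
  have halt : expand_corridor_alt adj pb hops
      = pvBfsB adj hops new (new.map (fun b => (b, 0))) := by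
    show pvBfsB adj hops (pb.foldl (pvPush 0) (PySem.Set.empty, [])).1
        (pb.foldl (pvPush 0) (PySem.Set.empty, [])).2 = _
    have : pb.foldl (pvPush 0) (PySem.Set.empty, []) = (new, new.map (fun b => (b, (0 : Int)))) := hB
    rw [this]
  rw [halt]
  by_cases hpos : 0 < hops
  · set m := hops.toNat - 1 with hm
    have hml : (PySem.List.pyRange 0 hops 1).length = m + 1 := by
      rw [PySem.List.length_pyRange_one]; omega
    have h0 : (0 : Int) = hops - ((m : Int) + 1) := by omega
    unfold expand_corridor
    rw [pvFoldConst, hml, Function.iterate_succ_apply]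
    have hQm := pvR adj hops m (pvQ adj hops m) new [] new (by simp)
    simp only [List.map_nil, List.append_nil] at hQm
    rw [hnew] at hQm ⊢
    rw [h0, hQm]
    rfl
  · unfold expand_corridor
    rw [PySem.List.pyRange_one_eq_nil (by omega), List.foldl_nil]
    rw [pvDrain adj hops _ _ ?_]
    · exact hnew.symm
    · intro p hp
      obtain ⟨b, _, rfl⟩ := List.mem_map.mp hp
      simpa using hpos
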